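-- pv_equiv track=rewrite | github.com/seongjo-seo/Baekjoon | 프로그래머스/unrated/181874. A 강조하기/A 강조하기.py | solution
-- ===== SOURCE A (Python) =====
-- def solution(myString):
--     answer = ''
--     for char in myString:
--         if char == 'a' or char == 'A':
--             answer += char.upper()
--         else:
--             answer += char.lower()
--     return answer
-- ===== SOURCE B (Python) =====
-- def solution(myString):
--     return myString.lower().replace('a', 'A')
-- ===== Notes on version B (the rewrite author's own statement) =====
-- stated objective: idiomatic
-- what changed: Replaces the per-character loop with a branch and string accumulation by two whole-string passes: lowercase the whole string, then replace every resulting lowercase-a with its uppercase form.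
import Mathlib
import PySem

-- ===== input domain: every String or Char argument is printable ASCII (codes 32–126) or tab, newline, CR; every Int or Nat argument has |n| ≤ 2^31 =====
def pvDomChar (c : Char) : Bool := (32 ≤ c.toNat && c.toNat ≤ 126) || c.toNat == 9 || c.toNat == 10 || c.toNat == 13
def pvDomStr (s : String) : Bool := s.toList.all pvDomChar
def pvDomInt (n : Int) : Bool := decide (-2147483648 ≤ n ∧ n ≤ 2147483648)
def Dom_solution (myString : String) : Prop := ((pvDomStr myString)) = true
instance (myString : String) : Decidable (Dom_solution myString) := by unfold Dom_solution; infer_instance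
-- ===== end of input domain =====

-- B replaces A's per-character loop (branch + string accumulation) by two whole-string
-- passes: lowercase everything, then replace 'a' with 'A' (objective: idiomatic).


-- ===== PORT A =====
-- A's loop: answer = ''; for char: answer += char.upper() if char in {'a','A'} else char.lower()
def solutionLoop (answer : List Char) : List Char → List Char
  | [] => answer
  | c :: rest =>
    if c == 'a' || c == 'A' then solutionLoop (answer ++ [PySem.Chars.upperChar c]) rest
    else solutionLoop (answer ++ [PySem.Chars.lowerChar c]) rest

def solution (myString : String) : String :=
  String.ofList (solutionLoop [] myString.toList)

-- ===== PORT B =====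
def solution_alt (myString : String) : String :=
  PySem.Str.replace (PySem.Str.lower myString) "a" "A"

-- ===== PRECONDITION & SPEC =====
def Spec_solution (myString : String) (out : String) : Prop := out = solution_alt myString
instance (myString : String) (out : String) : Decidable (Spec_solution myString out) := by unfold Spec_solution; infer_instance

-- ===== CLAIM (what is proved, stated in full; the proofs are below) =====
def Claim_equal_solution : Prop := ∀ (myString : String), Dom_solution myString → Spec_solution myString (solution myString)

-- ===== LEMMAS AND PROOFS =====

-- the single-character function B's replace applies after lowering
def repA (c : Char) : Char := if c == 'a' then 'A' else c
-- the single-character function A's branch computes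
def markA (c : Char) : Char :=
  if c == 'a' || c == 'A' then PySem.Chars.upperChar c else PySem.Chars.lowerChar c

theorem solutionLoop_eq (cs : List Char) : ∀ (acc : List Char),
    solutionLoop acc cs = acc ++ cs.map markA := by
  induction cs with
  | nil => intro acc; simp [solutionLoop]
  | cons c rest ih =>
    intro acc
    by_cases h : (c == 'a' || c == 'A') = true
    · simp [solutionLoop, h, ih, markA]
    · simp [solutionLoop, h, ih, markA]

theorem replace_go_single (fuel : ℕ) : ∀ (l acc : List Char), l.length ≤ fuel →
    PySem.Chars.replace.go ['a'] ['A'] fuel l acc = acc.reverse ++ l.map repA := by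
  induction fuel with
  | zero =>
    intro l acc h
    have : l = [] := List.eq_nil_of_length_eq_zero (Nat.le_zero.mp h)
    subst this; simp [PySem.Chars.replace.go]
  | succ n ih =>
    intro l acc h
    cases l with
    | nil => simp [PySem.Chars.replace.go]
    | cons c t =>
      simp only [PySem.Chars.replace.go]
      by_cases hc : c = 'a'
      · subst hc
        have hpre : List.isPrefixOf ['a'] ('a' :: t) = true := by
          simp [List.isPrefixOf]
        rw [if_pos hpre]
        have ht : t.length ≤ n := by simpa using Nat.succ_le_succ_iff.mp (by simpa using h)
        rw [ih _ _ (by simpa using ht)]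
        simp [repA]
      · have hpre : List.isPrefixOf ['a'] (c :: t) = false := by
          simp only [List.isPrefixOf, Bool.and_true, beq_eq_false_iff_ne, ne_eq]
          exact fun h => hc h.symm
        rw [if_neg (by simp [hpre])]
        have ht : t.length ≤ n := by simpa using Nat.succ_le_succ_iff.mp (by simpa using h)
        rw [ih _ _ ht]
        simp [repA, hc]

theorem replace_single (l : List Char) :
    PySem.Chars.replace l ['a'] ['A'] = l.map repA := by
  simp only [PySem.Chars.replace, List.isEmpty_cons]
  simpa using replace_go_single l.length l [] le_rfl

theorem char_eq_iff_toNat (c d : Char) : c = d ↔ c.toNat = d.toNat := by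
  constructor
  · intro h; rw [h]
  · intro h; exact Char.ext (UInt32.toNat_inj.mp h)

theorem repA_lowerChar (c : Char) : repA (PySem.Chars.lowerChar c) = markA c := by
  by_cases ha : c = 'a'
  · subst ha; decide
  · by_cases hA : c = 'A'
    · subst hA; decide
    · have hlow : PySem.Chars.lowerChar c ≠ 'a' := by
        unfold PySem.Chars.lowerChar PySem.Chars.isupper
        split
        · rename_i h
          simp only [Bool.and_eq_true, decide_eq_true_eq, Char.le_def] at h
          intro heq
          have := (char_eq_iff_toNat _ _).mp heq
          rw [Char.toNat_ofNat] at this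
          have hZ : 'Z'.toNat = 90 := rfl
          have hvalid : (c.toNat + 32).isValidChar := by
            left
            have h2 : c.toNat ≤ 'Z'.toNat := h.2
            rw [hZ] at h2
            omega
          rw [if_pos hvalid] at this
          have ha97 : 'a'.toNat = 97 := rfl
          have hA65 : 'A'.toNat = 65 := rfl
          exact hA ((char_eq_iff_toNat c 'A').mpr (by omega))
        · exact ha
      have hmark : markA c = PySem.Chars.lowerChar c := by
        simp [markA, ha, hA]
      simp [repA, hlow, hmark]

theorem map_repA_lower (cs : List Char) :
    (PySem.Chars.lower cs).map repA = cs.map markA := by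
  simp [PySem.Chars.lower, List.map_map, Function.comp_def, repA_lowerChar]

-- ===== VERDICT (by name: the statement is the Claim_ definition above) =====
theorem solution_spec : Claim_equal_solution := by
  intro s _
  unfold Spec_solution solution solution_alt PySem.Str.replace
  congr 1
  rw [PySem.Str.toList_lower]
  show solutionLoop [] s.toList =
    PySem.Chars.replace (PySem.Chars.lower s.toList) "a".toList "A".toList
  have ha : "a".toList = ['a'] := rfl
  have hA : "A".toList = ['A'] := rfl
  rw [ha, hA, replace_single, map_repA_lower, solutionLoop_eq]
  simp
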